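-- pv_equiv track=rewrite | github.com/zappyk-github/zappyk-python | lib/lib_zappyk/_pdf2txt.py | __get_ymax
-- ===== SOURCE A (Python) =====
-- def __get_ymax(coord):
--     # maximxum y-coordinate of a character
--     comma = 0
--     pos = 0
--     for i in coord:
--         if (i == ","):
--             comma += 1
--         if (comma == 3):
--             break
--         pos += 1
--     return(coord[pos+1:])
-- ===== SOURCE B (Python) =====
-- def __get_ymax(coord):
--     # maximum y-coordinate of a character: the text after the third comma
--     parts = coord.split(',', 3)
--     return parts[3] if len(parts) == 4 else ''
-- ===== Notes on version B (the rewrite author's own statement) =====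
-- stated objective: simpler
-- what changed: Replaces the character-by-character comma-counting scan and slice with a single bounded split(',', 3) and a guarded index into the resulting field list; the split runs in C instead of a Python-level loop.
import Mathlib
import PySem

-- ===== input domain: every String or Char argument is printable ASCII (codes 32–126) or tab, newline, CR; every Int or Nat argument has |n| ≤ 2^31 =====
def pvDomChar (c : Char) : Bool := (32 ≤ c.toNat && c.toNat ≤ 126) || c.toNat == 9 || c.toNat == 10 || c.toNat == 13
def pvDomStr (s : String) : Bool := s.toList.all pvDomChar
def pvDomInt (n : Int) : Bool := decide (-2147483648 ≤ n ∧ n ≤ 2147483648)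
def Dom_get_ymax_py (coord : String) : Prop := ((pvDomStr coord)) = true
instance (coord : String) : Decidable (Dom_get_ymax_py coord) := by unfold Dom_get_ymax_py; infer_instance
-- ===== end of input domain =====

-- B replaces A's character-by-character comma-counting scan with a bounded split(',', 3)
-- and a guarded index into the field list (objective: simpler).


-- ===== PORT A =====
-- A's loop: count commas left to right, break at the third one; pos ends at its index
-- (or at len(coord) when there is no third comma).
def getYmaxLoopA : List Char → Nat → Nat → Nat
  | [], _comma, pos => pos
  | c :: rest, comma, pos =>
    let comma' := if c = ',' then comma + 1 else comma
    if comma' = 3 then pos else getYmaxLoopA rest comma' (pos + 1)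

def get_ymax_py (coord : String) : String :=
  PySem.Str.slice coord (some ((getYmaxLoopA coord.toList 0 0 : Int) + 1)) none

-- ===== PORT B =====
def get_ymax_py_alt (coord : String) : String :=
  let parts := (PySem.Str.splitMax? coord "," 3).getD []
  if parts.length = 4 then parts.getD 3 "" else ""

-- ===== PRECONDITION & SPEC =====
def Spec_get_ymax_py (coord : String) (out : String) : Prop := out = get_ymax_py_alt coord
instance (coord : String) (out : String) : Decidable (Spec_get_ymax_py coord out) := by unfold Spec_get_ymax_py; infer_instance

-- ===== CLAIM (what is proved, stated in full; the proofs are below) =====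
def Claim_equal_get_ymax_py : Prop := ∀ (coord : String), Dom_get_ymax_py coord → Spec_get_ymax_py coord (get_ymax_py coord)

-- ===== LEMMAS AND PROOFS =====

-- proof-only helper: a fuel-free form of PySem.Chars.splitOnMax.go for the one-char separator ','
def bsplit : List Char → Nat → List Char → List (List Char)
  | l, 0, cur => [cur.reverse ++ l]
  | [], _ + 1, cur => [cur.reverse]
  | c :: rest, m + 1, cur =>
    if c = ',' then cur.reverse :: bsplit rest m [] else bsplit rest (m + 1) (c :: cur)

lemma go_eq_bsplit : ∀ (fuel : Nat) (l : List Char) (m : Nat) (cur : List Char)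
    (acc : List (List Char)), l.length < fuel →
    PySem.Chars.splitOnMax.go [','] fuel m l cur acc = acc.reverse ++ bsplit l m cur := by
  intro fuel
  induction fuel with
  | zero => intro l m cur acc h; omega
  | succ fuel ih =>
    intro l m cur acc h
    cases l with
    | nil =>
      cases m with
      | zero => simp [PySem.Chars.splitOnMax.go, bsplit]
      | succ m => simp [PySem.Chars.splitOnMax.go, bsplit]
    | cons c rest =>
      cases m with
      | zero => simp [PySem.Chars.splitOnMax.go, bsplit]
      | succ m =>
        simp only [PySem.Chars.splitOnMax.go]
        by_cases hc : c = ','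
        · subst hc
          simp [List.isPrefixOf, ih rest m [] (cur.reverse :: acc) (by simp at h ⊢; omega), bsplit]
        · have : ([','].isPrefixOf (c :: rest)) = false := by
            simp [List.isPrefixOf]; exact fun h' => hc h'.symm
          simp [this, hc, ih rest (m + 1) (c :: cur) acc (by simp at h ⊢; omega), bsplit]

lemma loopA_shift : ∀ (l : List Char) (comma p : Nat),
    getYmaxLoopA l comma (p + 1) = getYmaxLoopA l comma p + 1 := by
  intro l
  induction l with
  | nil => intro comma p; simp [getYmaxLoopA]
  | cons c rest ih =>
    intro comma p
    simp only [getYmaxLoopA]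
    split_ifs <;> simp [ih]

lemma main_eq : ∀ (l : List Char) (m : Nat) (cur : List Char), 0 < m → m ≤ 3 →
    (if (bsplit l m cur).length = m + 1 then (bsplit l m cur).getD m [] else ([] : List Char))
      = l.drop (getYmaxLoopA l (3 - m) 0 + 1) := by
  intro l
  induction l with
  | nil =>
    intro m cur hm _
    cases m with
    | zero => omega
    | succ m => simp [bsplit, getYmaxLoopA]
  | cons c rest ih =>
    intro m cur hm hm3
    cases m with
    | zero => omega
    | succ m =>
      by_cases hc : c = ','
      · subst hc
        cases m with
        | zero =>
          have h3 : (3 - 1 : Nat) + 1 = 3 := by omega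
          simp [bsplit, getYmaxLoopA, h3]
        | succ m =>
          have hlt : (3 - (m + 2) : Nat) + 1 ≠ 3 := by omega
          have hstep : (3 - (m + 2) : Nat) + 1 = 3 - (m + 1) := by omega
          have hnb : (3 - (m + 1) : Nat) ≠ 3 := by omega
          have hih := ih (m + 1) [] (by omega) (by omega)
          simp only [bsplit, getYmaxLoopA, if_true, List.length_cons,
            List.drop_succ_cons, List.getElem?_cons_succ, List.getD, hstep,
            if_neg hnb, loopA_shift, Nat.add_left_inj] at *
          exact hih
      · have hnb : 3 - (m + 1) ≠ 3 := by omega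
        simp only [bsplit, if_neg hc, getYmaxLoopA, if_neg hnb]
        rw [loopA_shift]
        have := ih (m + 1) (c :: cur) (by omega) (by omega)
        simpa using this

-- ===== VERDICT (by name: the statement is the Claim_ definition above) =====
theorem get_ymax_py_spec : Claim_equal_get_ymax_py := by
  intro coord _
  unfold Spec_get_ymax_py get_ymax_py get_ymax_py_alt
  have hmap := PySem.Str.splitMax?_map coord "," 3
  have hsep : (",".toList) = [','] := by decide
  rw [hsep] at hmap
  rw [show PySem.Chars.splitMax? coord.toList [','] 3
        = some (PySem.Chars.splitOnMax coord.toList [','] 3) from by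
      simp [PySem.Chars.splitMax?]] at hmap
  cases hX : PySem.Str.splitMax? coord "," 3 with
  | none => rw [hX] at hmap; simp at hmap
  | some X =>
    rw [hX] at hmap
    simp only [Option.map_some, Option.some.injEq] at hmap
    have hgo : PySem.Chars.splitOnMax coord.toList [','] 3 = bsplit coord.toList 3 [] := by
      simp only [PySem.Chars.splitOnMax]
      rw [if_neg (by omega)]
      exact go_eq_bsplit (coord.toList.length + 1) coord.toList 3 [] [] (by omega)
    have hkey := main_eq coord.toList 3 [] (by omega) (by omega)
    have hlen : X.length = (bsplit coord.toList 3 []).length := by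
      rw [← hgo, ← hmap]; simp
    -- compare via toList
    apply String.toList_injective
    rw [PySem.Str.toList_slice]
    rw [PySem.Chars.slice_eq_listSlice,
        PySem.List.slice_from _ (by positivity)]
    have htn : ((getYmaxLoopA coord.toList 0 0 : Int) + 1).toNat
        = getYmaxLoopA coord.toList 0 0 + 1 := by omega
    rw [htn]
    rw [show (3 : Nat) - 3 = 0 from rfl] at hkey
    rw [← hkey]
    simp only [Option.getD_some, hlen]
    split_ifs with h
    · -- X.getD 3 "" corresponds to (bsplit …).getD 3 []
      have : (X.getD 3 "").toList = (bsplit coord.toList 3 []).getD 3 [] := by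
        rw [← hgo, ← hmap]
        rcases h4 : X[3]? with _ | x
        · rw [List.getElem?_eq_none_iff] at h4
          have hx4 : X.length = 3 + 1 := by rw [hlen]; exact h
          omega
        · simp [List.getD, h4, List.getElem?_map]
      simpa using this.symm
    · simp
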